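-- pv_equiv track=rewrite | github.com/mec07/PyLATO | pylato/hamiltonian.py | map_index_to_atomic
-- ===== SOURCE A (Python) =====
-- def map_index_to_atomic(index, num_atoms, num_orbitals):
--     """
--     Function map_index_to_atomic converts the index of the Fock matrix into atom
--     number, orbital number and spin. Index numbering starts at 0 and goes up to
--     the length of the Fock matrix. Atomic numbering starts at 0 and goes up to
--     num_atoms-1, orbital numbering goes starts at 0 and goes up to num_orbitals-1
--     for that particular atom.
--
--     ASSUMPTIONS
--     The function treats orbital number and spin separately. It will work for atoms
--     with different numbers of spatial orbitals -- if only atoms of the same type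
--     are going to be used the code could be made to be more efficient.
--
--     This could probably also be improved by providing the length of the side of the
--     Fock matrix.
--
--     INPUT                 DATA TYPE       DESCRIPTION
--
--     index                 int             The index to be converted to atom,
--                                           orbital and spin.
--
--     num_atoms             int             The number of atoms.
--
--     num_orbitals          list of int     The number of orbitals for each atom.
--
--
--     OUTPUT                DATA TYPE       DESCRIPTION
--
--     atom                  int             The atom number.
--
--     orbital               int             The spatial orbital number.
--
--     spin                  int             The spin, either 0 (up) or 1 (down).
--
--     """
--     upper_bound = 0
--     # loop over spin
--     for ss in range(2):
--         # loop over the atoms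
--         for ii in range(num_atoms):
--             upper_bound += num_orbitals[ii]
--             if index < upper_bound:
--                 atom = ii
--                 spin = ss
--                 # orbital is the index minus the previous upper bound
--                 orbital = index-(upper_bound-num_orbitals[ii])
--                 return atom, orbital, spin
-- ===== SOURCE B (Python) =====
-- def _locate(rem, xs):
--     """Divide and conquer: first slot whose entry exceeds the running remainder,
--     returning (position, leftover remainder), or None if the remainder never fits."""
--     if not xs:
--         return None
--     if len(xs) == 1:
--         return (0, rem) if rem < xs[0] else None
--     mid = len(xs) // 2
--     hit = _locate(rem, xs[:mid])
--     if hit is not None: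
--         return hit
--     hit = _locate(rem - sum(xs[:mid]), xs[mid:])
--     if hit is None:
--         return None
--     return (mid + hit[0], hit[1])
--
--
-- def map_index_to_atomic(index, num_atoms, num_orbitals):
--     counts = num_orbitals[:num_atoms]
--     hit = _locate(index, counts)
--     if hit is not None:
--         return hit[0], hit[1], 0
--     hit = _locate(index - sum(counts), counts)
--     if hit is not None:
--         return hit[0], hit[1], 1
-- ===== Notes on version B (the rewrite author's own statement) =====
-- stated objective: alternative
-- what changed: A's nested accumulator loops (outer over the two spins, inner walking the atoms with a growing upper bound) are replaced by a staged top level (try spin block 0, else shift the index by the block total and try block 1) over a divide-and-conquer locator that recursively splits the count list in half and carries a decreasing remainder; Pre_ admits exactly the inputs on which A returns a tuple.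
-- outside the precondition, e.g. on map_index_to_atomic(-1, -1, [0, 1]): A returns None, B returns (0, -1, 0)
import Mathlib
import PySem

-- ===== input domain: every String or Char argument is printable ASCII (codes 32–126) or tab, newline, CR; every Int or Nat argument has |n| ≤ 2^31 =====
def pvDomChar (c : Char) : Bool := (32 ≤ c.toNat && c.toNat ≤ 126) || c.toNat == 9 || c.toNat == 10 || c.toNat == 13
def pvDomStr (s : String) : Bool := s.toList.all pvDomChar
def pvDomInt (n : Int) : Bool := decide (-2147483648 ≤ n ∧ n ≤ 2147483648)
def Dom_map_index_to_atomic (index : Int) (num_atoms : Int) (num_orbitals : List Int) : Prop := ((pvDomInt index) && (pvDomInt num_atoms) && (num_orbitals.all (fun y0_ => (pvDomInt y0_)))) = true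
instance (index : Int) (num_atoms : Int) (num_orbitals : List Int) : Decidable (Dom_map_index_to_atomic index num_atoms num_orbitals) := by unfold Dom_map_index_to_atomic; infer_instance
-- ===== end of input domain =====

-- B replaces A's nested spin/atom accumulator loops by a staged two-block top level over a
-- divide-and-conquer locator that halves the count list and carries a decreasing remainder.


-- ===== PORT A =====
-- inner loop 'for ii in range(num_atoms)': counter ii with fuel (num_atoms - ii).toNat;
-- nums[ii] is pyGet? (none = IndexError, excluded by Pre_; the loop then stops empty)
def pvInnerA (index : Int) (nums : List Int) (ss : Int) : Nat → Int → Int → Int × Option (Int × Int × Int)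
  | 0, _, ub => (ub, none)
  | fuel + 1, ii, ub =>
    match PySem.List.pyGet? nums ii with
    | none => (ub, none)
    | some v =>
      let ub' := ub + v
      if index < ub' then (ub', some (ii, index - (ub' - v), ss))
      else pvInnerA index nums ss fuel (ii + 1) ub'

-- outer loop 'for ss in range(2)'; the fall-through (Python None) yields none
def pvOuterA (index : Int) (num_atoms : Int) (nums : List Int) (ub : Int) :
    List Int → Option (Int × Int × Int)
  | [] => none
  | ss :: rest =>
    match pvInnerA index nums ss num_atoms.toNat 0 ub with
    | (_, some r) => some r
    | (ub', none) => pvOuterA index num_atoms nums ub' rest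

def map_index_to_atomic (index : Int) (num_atoms : Int) (num_orbitals : List Int) : Int × Int × Int :=
  (pvOuterA index num_atoms num_orbitals 0 (PySem.List.pyRange 0 2 1)).getD (0, 0, 0)

-- ===== PORT B =====
-- _locate(rem, xs): 'mid = len(xs) // 2' on a nonnegative length is Nat division;
-- 'xs[:mid]' / 'xs[mid:]' with 0 ≤ mid ≤ len are exactly take/drop (PySem.List.slice_to_natCast /
-- slice_from_natCast); 'sum' is List.sum.
def pvLocateB (rem : Int) (xs : List Int) : Option (Int × Int) :=
  match xs with
  | [] => none
  | [c] => if rem < c then some (0, rem) else none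
  | c1 :: c2 :: rest =>
    let mid := (c1 :: c2 :: rest).length / 2
    match pvLocateB rem ((c1 :: c2 :: rest).take mid) with
    | some p => some p
    | none =>
      match pvLocateB (rem - ((c1 :: c2 :: rest).take mid).sum) ((c1 :: c2 :: rest).drop mid) with
      | none => none
      | some (a, o) => some ((mid : Int) + a, o)
termination_by xs.length
decreasing_by
  · simp [List.length_take]; omega
  · simp [List.length_drop]; omega

-- 'counts = num_orbitals[:num_atoms]' is slice; the final fall-through (Python None)
-- is unreachable under Pre_ and ported as the same default A's .getD uses
def map_index_to_atomic_alt (index : Int) (num_atoms : Int) (num_orbitals : List Int) : Int × Int × Int :=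
  let counts := PySem.List.slice num_orbitals none (some num_atoms)
  match pvLocateB index counts with
  | some (a, o) => (a, o, 0)
  | none =>
    match pvLocateB (index - counts.sum) counts with
    | some (a, o) => (a, o, 1)
    | none => (0, 0, 0)

-- ===== PRECONDITION & SPEC =====
-- Pre_ holds exactly when the Python A returns a tuple: num_atoms is positive and the
-- index falls below some running cumulative bound of its two-pass scan before the scan
-- either reads past the end of num_orbitals (IndexError) or ends (fall-through None);
-- on an excluded non-positive num_atoms A returns None while B's Python slice
-- num_orbitals[:num_atoms] can be nonempty, so B may still return a tuple there.
def Pre_map_index_to_atomic (index : Int) (num_atoms : Int) (num_orbitals : List Int) : Prop :=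
  0 < num_atoms ∧
  ((num_atoms ≤ (num_orbitals.length : Int) ∧
      ∃ k < 2 * num_atoms.toNat,
        index < ((num_orbitals.take num_atoms.toNat ++ num_orbitals.take num_atoms.toNat).take (k + 1)).sum) ∨
   ((num_orbitals.length : Int) < num_atoms ∧
      ∃ k < num_orbitals.length, index < (num_orbitals.take (k + 1)).sum))
instance (index : Int) (num_atoms : Int) (num_orbitals : List Int) : Decidable (Pre_map_index_to_atomic index num_atoms num_orbitals) := by unfold Pre_map_index_to_atomic; infer_instance

def pvWitness_map_index_to_atomic : Int × Int × List Int := (3, 2, [2, 2])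

def Spec_map_index_to_atomic (index : Int) (num_atoms : Int) (num_orbitals : List Int) (out : Int × Int × Int) : Prop := out = map_index_to_atomic_alt index num_atoms num_orbitals
instance (index : Int) (num_atoms : Int) (num_orbitals : List Int) (out : Int × Int × Int) : Decidable (Spec_map_index_to_atomic index num_atoms num_orbitals out) := by unfold Spec_map_index_to_atomic; infer_instance

-- ===== CLAIM (what is proved, stated in full; the proofs are below) =====
def Claim_equal_map_index_to_atomic : Prop := ∀ (index : Int) (num_atoms : Int) (num_orbitals : List Int), Dom_map_index_to_atomic index num_atoms num_orbitals → Pre_map_index_to_atomic index num_atoms num_orbitals → Spec_map_index_to_atomic index num_atoms num_orbitals (map_index_to_atomic index num_atoms num_orbitals)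

-- ===== LEMMAS AND PROOFS =====

-- proof-side mirror of one of A's passes, recursing on the atom-count list itself
def pvListInner (index : Int) (ss : Int) (ub ii : Int) :
    List Int → Int × Option (Int × Int × Int)
  | [] => (ub, none)
  | v :: rest =>
    let ub' := ub + v
    if index < ub' then (ub', some (ii, index - (ub' - v), ss))
    else pvListInner index ss ub' (ii + 1) rest

-- A's fuelled pass over ii = a, a+1, … equals the list recursion on the readable suffix
theorem pvInnerA_eq_list (index ss : Int) (nums : List Int) (num_atoms : Int) :
    ∀ (fuel : Nat) (a ub : Int), 0 ≤ a → (num_atoms - a).toNat = fuel →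
    pvInnerA index nums ss fuel a ub =
      pvListInner index ss ub a ((nums.take num_atoms.toNat).drop a.toNat) := by
  intro fuel
  induction fuel with
  | zero =>
    intro a ub ha hk
    have : num_atoms.toNat ≤ a.toNat := by omega
    rw [List.drop_eq_nil_of_le (by simpa using le_trans (List.length_take_le _ _) this)]
    rfl
  | succ fuel ih =>
    intro a ub ha hk
    by_cases haL : a.toNat < nums.length
    · have hget : PySem.List.pyGet? nums a = some nums[a.toNat] :=
        PySem.List.pyGet?_eq_some_getElem nums ha (by omega)
      have hdrop : (nums.take num_atoms.toNat).drop a.toNat =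
          nums[a.toNat] :: (nums.take num_atoms.toNat).drop (a.toNat + 1) := by
        have hlt : a.toNat < (nums.take num_atoms.toNat).length := by
          rw [List.length_take]; omega
        rw [List.drop_eq_getElem_cons hlt]
        simp [List.getElem_take]
      rw [hdrop]
      simp only [pvInnerA, hget, pvListInner]
      by_cases hc : index < ub + nums[a.toNat]
      · simp [hc]
      · simp [hc]
        have : (a + 1).toNat = a.toNat + 1 := by omega
        rw [← this, ih (a + 1) (ub + nums[a.toNat]) (by omega) (by omega)]
    · have hget : PySem.List.pyGet? nums a = none := by
        have h := PySem.List.pyGet?_of_nonneg nums ha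
        rw [h]
        exact List.getElem?_eq_none (by omega)
      have hdrop : (nums.take num_atoms.toNat).drop a.toNat = [] :=
        List.drop_eq_nil_of_le (by rw [List.length_take]; omega)
      rw [hdrop]
      simp only [pvInnerA, hget, pvListInner]

-- a missing pass consumed the whole list: its final upper bound is ub + sum
theorem pvListInner_none_fst (index ss : Int) :
    ∀ (l : List Int) (ub ii : Int),
    (pvListInner index ss ub ii l).2 = none →
    (pvListInner index ss ub ii l).1 = ub + l.sum := by
  intro l
  induction l with
  | nil => intro ub ii _; simp [pvListInner]
  | cons v rest ih =>
    intro ub ii h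
    simp only [pvListInner] at h ⊢
    by_cases hc : index < ub + v
    · simp [hc] at h
    · simp only [hc, if_false] at h ⊢
      rw [ih (ub + v) (ii + 1) h]
      simp; ring

-- sequential reference form of B's locator (proof-side only)
def pvLinLoc (rem : Int) : List Int → Option (Int × Int)
  | [] => none
  | c :: rest =>
    if rem < c then some (0, rem)
    else
      match pvLinLoc (rem - c) rest with
      | none => none
      | some (a, o) => some (a + 1, o)

-- the sequential locator splits at an append, shifting remainder and position
theorem pvLinLoc_append (l1 : List Int) :
    ∀ (l2 : List Int) (rem : Int),
    pvLinLoc rem (l1 ++ l2) =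
      match pvLinLoc rem l1 with
      | some p => some p
      | none => (pvLinLoc (rem - l1.sum) l2).map (fun p => ((l1.length : Int) + p.1, p.2)) := by
  induction l1 with
  | nil =>
    intro l2 rem
    simp only [List.nil_append, pvLinLoc, List.sum_nil, List.length_nil, sub_zero]
    cases h : pvLinLoc rem l2 with
    | none => simp
    | some p => simp
  | cons c l1' ih =>
    intro l2 rem
    by_cases h : rem < c
    · simp only [List.cons_append, pvLinLoc, if_pos h]
    · simp only [List.cons_append, pvLinLoc, if_neg h]
      rw [ih l2 (rem - c)]
      cases hu : pvLinLoc (rem - c) l1' with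
      | some p => simp
      | none =>
        simp only []
        have harg : rem - c - l1'.sum = rem - (c :: l1').sum := by simp; ring
        rw [harg]
        cases hv : pvLinLoc (rem - (c :: l1').sum) l2 with
        | none => simp
        | some p =>
          simp only [Option.map_some, Option.some.injEq, Prod.mk.injEq, List.length_cons]
          refine ⟨?_, trivial⟩
          push_cast
          ring

theorem pvLocateB_eq_lin_aux :
    ∀ (n : Nat) (rem : Int) (xs : List Int), xs.length ≤ n →
    pvLocateB rem xs = pvLinLoc rem xs := by
  intro n
  induction n with
  | zero =>
    intro rem xs h
    have hx : xs = [] := List.eq_nil_of_length_eq_zero (by omega)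
    subst hx
    simp [pvLocateB, pvLinLoc]
  | succ n ih =>
    intro rem xs h
    rcases xs with _ | ⟨c1, xs1⟩
    · simp [pvLocateB, pvLinLoc]
    rcases xs1 with _ | ⟨c2, rest⟩
    · by_cases hc : rem < c1 <;> simp [pvLocateB, pvLinLoc, hc]
    · simp only [pvLocateB]
      have hlen : (c1 :: c2 :: rest).length = rest.length + 2 := by simp
      have hm1 : 1 ≤ (c1 :: c2 :: rest).length / 2 := by omega
      have hmlt : (c1 :: c2 :: rest).length / 2 < (c1 :: c2 :: rest).length := by omega
      have hlt : ((c1 :: c2 :: rest).take ((c1 :: c2 :: rest).length / 2)).length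
          = (c1 :: c2 :: rest).length / 2 := by
        rw [List.length_take]; omega
      rw [ih rem ((c1 :: c2 :: rest).take ((c1 :: c2 :: rest).length / 2)) (by omega),
          ih (rem - ((c1 :: c2 :: rest).take ((c1 :: c2 :: rest).length / 2)).sum)
             ((c1 :: c2 :: rest).drop ((c1 :: c2 :: rest).length / 2))
             (by rw [List.length_drop]; omega)]
      have hsplit : pvLinLoc rem (c1 :: c2 :: rest) =
          match pvLinLoc rem ((c1 :: c2 :: rest).take ((c1 :: c2 :: rest).length / 2)) with
          | some p => some p
          | none =>
            (pvLinLoc (rem - ((c1 :: c2 :: rest).take ((c1 :: c2 :: rest).length / 2)).sum)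
                ((c1 :: c2 :: rest).drop ((c1 :: c2 :: rest).length / 2))).map
              (fun p => ((((c1 :: c2 :: rest).take ((c1 :: c2 :: rest).length / 2)).length : Int) + p.1, p.2)) := by
        conv_lhs => rw [← List.take_append_drop ((c1 :: c2 :: rest).length / 2) (c1 :: c2 :: rest)]
        rw [pvLinLoc_append]
      rw [hsplit]
      cases hu : pvLinLoc rem ((c1 :: c2 :: rest).take ((c1 :: c2 :: rest).length / 2)) with
      | some p => simp
      | none =>
        cases hv : pvLinLoc (rem - ((c1 :: c2 :: rest).take ((c1 :: c2 :: rest).length / 2)).sum)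
            ((c1 :: c2 :: rest).drop ((c1 :: c2 :: rest).length / 2)) with
        | none => simp
        | some p => simp; omega

-- the divide-and-conquer locator computes the sequential locator's value
theorem pvLocateB_eq_lin (rem : Int) (xs : List Int) : pvLocateB rem xs = pvLinLoc rem xs :=
  pvLocateB_eq_lin_aux xs.length rem xs le_rfl

-- one of A's passes is the sequential locator on (index - bound), position shifted by ii
theorem pvListInner_eq_lin (index ss : Int) :
    ∀ (l : List Int) (b ii : Int),
    (pvListInner index ss b ii l).2 =
      (pvLinLoc (index - b) l).map (fun p => (ii + p.1, p.2, ss)) := by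
  intro l
  induction l with
  | nil => intro b ii; simp [pvListInner, pvLinLoc]
  | cons c rest ih =>
    intro b ii
    by_cases h : index < b + c
    · simp only [pvListInner, pvLinLoc, if_pos h, if_pos (show index - b < c by omega)]
      simp only [Option.map_some, Option.some.injEq, Prod.mk.injEq]
      and_intros <;> first | omega | trivial
    · simp only [pvListInner, pvLinLoc, if_neg h, if_neg (show ¬ index - b < c by omega)]
      rw [ih (b + c) (ii + 1)]
      have harg : index - b - c = index - (b + c) := by ring
      rw [harg]
      cases hv : pvLinLoc (index - (b + c)) rest with
      | none => simp
      | some p =>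
        simp only [Option.map_some, Option.some.injEq, Prod.mk.injEq]
        and_intros <;> first | omega | trivial

theorem pvRange_two : PySem.List.pyRange 0 2 1 = [0, 1] := by decide

-- ===== VERDICT (by name: the statement is the Claim_ definition above) =====
theorem map_index_to_atomic_spec : Claim_equal_map_index_to_atomic := by
  intro index num_atoms nums _ hpre
  obtain ⟨hna, -⟩ := hpre
  unfold Spec_map_index_to_atomic map_index_to_atomic map_index_to_atomic_alt
  have hslice : PySem.List.slice nums none (some num_atoms) = nums.take num_atoms.toNat :=
    PySem.List.slice_to nums (le_of_lt hna)
  rw [pvRange_two]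
  simp only [hslice]
  have hA0 := pvInnerA_eq_list index 0 nums num_atoms num_atoms.toNat 0 0 le_rfl (by omega)
  simp only [Int.toNat_zero, List.drop_zero] at hA0
  have hA1 : ∀ ub : Int, pvInnerA index nums 1 num_atoms.toNat 0 ub =
      pvListInner index 1 ub 0 (nums.take num_atoms.toNat) := by
    intro ub
    have := pvInnerA_eq_list index 1 nums num_atoms num_atoms.toNat 0 ub le_rfl (by omega)
    simpa using this
  have hrel0 := pvListInner_eq_lin index 0 (nums.take num_atoms.toNat) 0 0
  rw [sub_zero, ← pvLocateB_eq_lin] at hrel0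
  rcases hpl : pvListInner index 0 0 0 (nums.take num_atoms.toNat) with ⟨ub1, o1⟩
  rw [hpl] at hrel0
  simp only at hrel0
  cases hloc : pvLocateB index (nums.take num_atoms.toNat) with
  | some p =>
    rw [hloc] at hrel0
    obtain ⟨a, o⟩ := p
    simp only [Option.map_some] at hrel0
    subst hrel0
    simp only [pvOuterA, hA0, hpl, Option.getD_some]
    simp
  | none =>
    rw [hloc] at hrel0
    simp only [Option.map_none] at hrel0
    subst hrel0
    have hub1 : ub1 = 0 + (nums.take num_atoms.toNat).sum := by
      have h := pvListInner_none_fst index 0 (nums.take num_atoms.toNat) 0 0 (by rw [hpl])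
      rw [hpl] at h
      simpa using h
    have hrel1 := pvListInner_eq_lin index 1 (nums.take num_atoms.toNat) ub1 0
    have harg : index - ub1 = index - (nums.take num_atoms.toNat).sum := by
      rw [hub1]; ring
    rw [harg, ← pvLocateB_eq_lin] at hrel1
    rcases hpl2 : pvListInner index 1 ub1 0 (nums.take num_atoms.toNat) with ⟨ub2, o2⟩
    rw [hpl2] at hrel1
    simp only at hrel1
    cases hloc2 : pvLocateB (index - (nums.take num_atoms.toNat).sum) (nums.take num_atoms.toNat) with
    | some p =>
      rw [hloc2] at hrel1
      obtain ⟨a, o⟩ := p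
      simp only [Option.map_some] at hrel1
      subst hrel1
      simp only [pvOuterA, hA0, hpl, hA1, hpl2, Option.getD_some]
      simp
    | none =>
      rw [hloc2] at hrel1
      simp only [Option.map_none] at hrel1
      subst hrel1
      simp only [pvOuterA, hA0, hpl, hA1, hpl2]
      rfl
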